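-- pv_equiv track=rewrite | github.com/M3dApp/Covid-19_Dashboard | modules/covid_data_handler.py | process_covid_csv_data
-- ===== SOURCE A (Python) =====
-- def process_covid_csv_data(covid_csv_data):
--     """
--     Extracts and calculates the stats from the csv data.
--
--     Args:
--         covid_csv_data (str[]): A list of data to be processed.
--
--     Returns:
--         last7days_cases (int): Total cases in the last 7 days.
--         current_hospital_cases (int): Total hospital cases.
--         total_deaths (int): Total deaths.
--     """
--     last7days_cases = None
--     current_hospital_cases = None
--     total_deaths = None
--     count = 0
--     for line in covid_csv_data:
--         if count > 0:
--             data = line.split(',')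
--             if (data[6] != "None" and len(data[6].replace("\n", "")) > 0) and count <= 8:
--                 if count > 1:
--                     last7days_cases = (last7days_cases != None and last7days_cases + int(data[6])) or int(data[6])
--                 count += 1
--             if data[5] != "None" and current_hospital_cases == None and len(data[5]) > 0:
--                 current_hospital_cases = int(data[5])
--             if data[4] != "None" and total_deaths == None and len(data[4]) > 0:
--                 total_deaths = int(data[4])
--         else:
--             count = 1
--     return last7days_cases, current_hospital_cases, total_deaths
-- ===== SOURCE B (Python) =====
-- def process_covid_csv_data(covid_csv_data):
--     """Three independent passes over the data rows instead of one interleaved state machine."""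
--     rows = [line.split(',') for line in covid_csv_data[1:]]
--
--     valid = [r[6] for r in rows
--              if r[6] != "None" and len(r[6].replace("\n", "")) > 0]
--     cases = [int(c) for c in valid[1:8]]
--     last7days_cases = sum(cases) if cases else None
--
--     current_hospital_cases = next(
--         (int(r[5]) for r in rows if r[5] != "None" and len(r[5]) > 0), None)
--     total_deaths = next(
--         (int(r[4]) for r in rows if r[4] != "None" and len(r[4]) > 0), None)
--
--     return last7days_cases, current_hospital_cases, total_deaths
-- ===== Notes on version B (the rewrite author's own statement) =====
-- stated objective: idiomatic
-- what changed: A's single interleaved loop with a shared count/None-state machine is decomposed into three independent passes: filter the valid column-6 cells, slice [1:8] and sum them plainly, plus two next()/early-exit scans for the first usable hospital and deaths cells.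
-- intended difference: On inputs where the daily-case prefix sums trigger A's '(x and ...) or ...' reset leaving a nonzero reset base (reachable only with negative case counts), A returns the plain 7-day sum minus that base (e.g. -5 for values 5,-5), while B returns the plain 7-day sum (0), the intended value; D_ is exact (tightness proved). — e.g. on process_covid_csv_data(["h,h,h,h,h,h,h", ",,,,None,None,1", ",,,,None,None,5", ",,,,None,None,-5"]): A returns (some (-5), none, none), B returns (some 0, none, none)
import Mathlib
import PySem

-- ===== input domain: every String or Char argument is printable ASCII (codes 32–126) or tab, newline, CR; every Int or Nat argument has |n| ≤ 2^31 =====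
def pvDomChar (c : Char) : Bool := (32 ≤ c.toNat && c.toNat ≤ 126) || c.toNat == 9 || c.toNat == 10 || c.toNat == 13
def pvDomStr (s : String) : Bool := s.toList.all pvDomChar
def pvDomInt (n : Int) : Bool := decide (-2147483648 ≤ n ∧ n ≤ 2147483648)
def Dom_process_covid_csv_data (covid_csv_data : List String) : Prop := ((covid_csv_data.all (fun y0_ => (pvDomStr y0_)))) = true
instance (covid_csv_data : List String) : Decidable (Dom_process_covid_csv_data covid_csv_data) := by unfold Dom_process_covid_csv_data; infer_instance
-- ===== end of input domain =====

-- B replaces A's single interleaved loop (shared count/None state machine) by three independent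
-- passes (filter+slice+sum for the 7-day cases, two early-exit scans for the other two fields);
-- outside D_ they return the same value, inside D_ B returns the plain sum instead of A's
-- or-expression artefact; neither program mutates its argument.

-- shared helper: line.split(',') — ',' ≠ "", so PySem.Str.split? is always `some`: exact
def pvSplit (s : String) : List String := (PySem.Str.split? s ",").getD []

-- `(last7 != None and last7 + x) or x`: with last7 = some c the `or` yields x when c + x == 0
def pvOrAcc (l7 : Option Int) (x : Int) : Int :=
  match l7 with
  | some c => if c + x = 0 then x else c + x
  | none => x

-- ===== PORT A =====
-- state = (last7days_cases, current_hospital_cases, total_deaths, count); `none` result = Python raised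
-- (IndexError on a row with < 7 columns, ValueError from int()); those inputs are excluded by Pre_.
-- if data[6] != "None" and len(data[6].replace("\n", "")) > 0 and count <= 8: ... (the 7-day-cases update)
def pvStep6 (l7 : Option Int) (count : Int) (d6 : String) : Option (Option Int × Int) :=
  if d6 ≠ "None" ∧ PySem.Str.len (PySem.Str.replace d6 "\n" "") > 0 ∧ count ≤ 8 then
    if count > 1 then
      match PySem.Int.ofStr? d6 with
      | some x => some (some (pvOrAcc l7 x), count + 1)
      | none => none
    else some (l7, count + 1)
  else some (l7, count)

-- if data[k] != "None" and <current> == None and len(data[k]) > 0: <current> = int(data[k])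
-- (the hospital-cases statement; the total-deaths statement is the same shape on column 4)
def pvStep5 (cur : Option Int) (dk : String) : Option (Option Int) :=
  if dk ≠ "None" ∧ cur = none ∧ PySem.Str.len dk > 0 then
    match PySem.Int.ofStr? dk with
    | some x => some (some x)
    | none => none
  else some cur

def pvStepA (st : Option Int × Option Int × Option Int × Int) (line : String) :
    Option (Option Int × Option Int × Option Int × Int) :=
  let (l7, hosp, deaths, count) := st
  if count > 0 then
    let data := pvSplit line
    match PySem.List.pyGet? data 6, PySem.List.pyGet? data 5, PySem.List.pyGet? data 4 with
    | some d6, some d5, some d4 =>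
      match pvStep6 l7 count d6 with
      | none => none
      | some (l7', count') =>
        match pvStep5 hosp d5 with
        | none => none
        | some hosp' =>
          match pvStep5 deaths d4 with
          | none => none
          | some deaths' => some (l7', hosp', deaths', count')
    | _, _, _ => none
  else some (l7, hosp, deaths, 1)

def pvLoopA (lines : List String) (st : Option Int × Option Int × Option Int × Int) :
    Option (Option Int × Option Int × Option Int × Int) :=
  match lines with
  | [] => some st
  | line :: rest =>
    match pvStepA st line with
    | some st' => pvLoopA rest st'
    | none => none

def process_covid_csv_data (covid_csv_data : List String) : Option Int × Option Int × Option Int :=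
  match pvLoopA covid_csv_data (none, none, none, 0) with
  | some (l7, hosp, deaths, _) => (l7, hosp, deaths)
  | none => (none, none, none)   -- Python raised here; excluded by Pre_

-- ===== PORT B =====
-- [r[6] for r in rows if r[6] != "None" and len(r[6].replace("\n", "")) > 0]
def pvValidCells (rows : List (List String)) : Option (List String) :=
  match rows with
  | [] => some []
  | r :: rest =>
    match PySem.List.pyGet? r 6 with
    | none => none
    | some c =>
      if c ≠ "None" ∧ PySem.Str.len (PySem.Str.replace c "\n" "") > 0 then
        match pvValidCells rest with
        | some cs => some (c :: cs)
        | none => none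
      else pvValidCells rest

-- cases = [int(c) for c in valid[1:8]]
def pvCases (cells : List String) : Option (List Int) :=
  match cells with
  | [] => some []
  | c :: rest =>
    match PySem.Int.ofStr? c with
    | none => none
    | some x =>
      match pvCases rest with
      | some xs => some (x :: xs)
      | none => none

-- next((int(r[k]) for r in rows if r[k] != "None" and len(r[k]) > 0), None)
def pvFirstInt (k : Int) (rows : List (List String)) : Option (Option Int) :=
  match rows with
  | [] => some none
  | r :: rest =>
    match PySem.List.pyGet? r k with
    | none => none
    | some c =>
      if c ≠ "None" ∧ PySem.Str.len c > 0 then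
        match PySem.Int.ofStr? c with
        | some x => some (some x)
        | none => none
      else pvFirstInt k rest

def process_covid_csv_data_alt (covid_csv_data : List String) : Option Int × Option Int × Option Int :=
  let rows := (PySem.List.slice covid_csv_data (some 1) none).map pvSplit
  match pvValidCells rows with
  | none => (none, none, none)
  | some valid =>
    match pvCases (PySem.List.slice valid (some 1) (some 8)) with
    | none => (none, none, none)
    | some cases =>
      let last7 : Option Int := if cases ≠ [] then some cases.sum else none
      match pvFirstInt 5 rows with
      | none => (none, none, none)
      | some hosp =>
        match pvFirstInt 4 rows with
        | none => (none, none, none)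
        | some deaths => (last7, hosp, deaths)

-- ===== PRECONDITION & SPEC =====
-- Exactly the inputs where Python A returns normally: every data row splits into ≥ 7 columns
-- (column 6 is indexed on every row), the valid column-6 cells numbered 2..8 parse as int, and the
-- first usable column-5 (hospital) and column-4 (deaths) cells parse as int.
def Pre_process_covid_csv_data (covid_csv_data : List String) : Prop :=
  let rows := (covid_csv_data.drop 1).map pvSplit
  (∀ r ∈ rows, 7 ≤ r.length) ∧
  (∀ c ∈ ((((rows.map (fun r => r.getD 6 "")).filter
      (fun c => decide (c ≠ "None" ∧ PySem.Str.len (PySem.Str.replace c "\n" "") > 0))).take 8).drop 1),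
    (PySem.Int.ofStr? c).isSome) ∧
  (∀ c ∈ ((rows.map (fun r => r.getD 5 "")).find?
      (fun c => decide (c ≠ "None" ∧ PySem.Str.len c > 0))), (PySem.Int.ofStr? c).isSome) ∧
  (∀ c ∈ ((rows.map (fun r => r.getD 4 "")).find?
      (fun c => decide (c ≠ "None" ∧ PySem.Str.len c > 0))), (PySem.Int.ofStr? c).isSome)
instance (covid_csv_data : List String) : Decidable (Pre_process_covid_csv_data covid_csv_data) := by
  unfold Pre_process_covid_csv_data; infer_instance

def pvWitness_process_covid_csv_data : List String :=
  ["areaCode,areaName,areaType,date,cumDeaths,hospitalCases,newCases",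
   "E1,Exeter,ltla,2021-11-01,120,35,42",
   "E1,Exeter,ltla,2021-10-31,118,None,40"]

-- the parsed daily-case values A sums: the 2nd..8th valid column-6 cells of the data rows
def pvD6cells (l : List String) : List Int :=
  ((((((l.drop 1).map pvSplit).map (fun r => r.getD 6 "")).filter
      (fun c => decide (c ≠ "None" ∧ PySem.Str.len (PySem.Str.replace c "\n" "") > 0))).take 8).drop 1).map
    (fun c => (PySem.Int.ofStr? c).getD 0)

-- the 'reset base': whenever the running prefix sum returns to the current base the base moves to
-- the previous prefix sum; A's 7-day total is (plain sum) − (final base), so the two programs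
-- differ exactly when the final base is nonzero
def pvRBStep (p : Int × Int) (x : Int) : Int × Int :=
  (p.1 + x, if p.1 + x = p.2 then p.1 else p.2)
def pvRB (xs : List Int) : Int := (xs.foldl pvRBStep (0, 0)).2

-- On inputs whose daily-case prefix sums leave a nonzero final reset base (reachable only with
-- negative counts), A's `(x and …) or …` expression has reset the running total and returns the
-- plain 7-day sum minus that base; B returns the plain 7-day sum, the intended value.
def D_process_covid_csv_data (covid_csv_data : List String) : Prop :=
  pvRB (pvD6cells covid_csv_data) ≠ 0
instance (covid_csv_data : List String) : Decidable (D_process_covid_csv_data covid_csv_data) := by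
  unfold D_process_covid_csv_data; infer_instance

def Spec_process_covid_csv_data (covid_csv_data : List String) (out : Option Int × Option Int × Option Int) : Prop := ¬ D_process_covid_csv_data covid_csv_data → out = process_covid_csv_data_alt covid_csv_data
instance (covid_csv_data : List String) (out : Option Int × Option Int × Option Int) : Decidable (Spec_process_covid_csv_data covid_csv_data out) := by unfold Spec_process_covid_csv_data; infer_instance

def pvDiffWitness_process_covid_csv_data : List String :=
  ["h,h,h,h,h,h,h", ",,,,None,None,1", ",,,,None,None,5", ",,,,None,None,-5"]
def pvDiffWitnessOut_process_covid_csv_data : (Option Int × Option Int × Option Int) × (Option Int × Option Int × Option Int) :=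
  ((some (-5), none, none), (some 0, none, none))

-- ===== CLAIM (what is proved, stated in full; the proofs are below) =====
def Claim_unchanged_process_covid_csv_data : Prop := ∀ (covid_csv_data : List String), Dom_process_covid_csv_data covid_csv_data → Pre_process_covid_csv_data covid_csv_data → Spec_process_covid_csv_data covid_csv_data (process_covid_csv_data covid_csv_data)
def Claim_changed_process_covid_csv_data : Prop := Dom_process_covid_csv_data (pvDiffWitness_process_covid_csv_data) ∧ Pre_process_covid_csv_data (pvDiffWitness_process_covid_csv_data) ∧ D_process_covid_csv_data (pvDiffWitness_process_covid_csv_data) ∧ process_covid_csv_data (pvDiffWitness_process_covid_csv_data) = pvDiffWitnessOut_process_covid_csv_data.1 ∧ process_covid_csv_data_alt (pvDiffWitness_process_covid_csv_data) = pvDiffWitnessOut_process_covid_csv_data.2 ∧ pvDiffWitnessOut_process_covid_csv_data.1 ≠ pvDiffWitnessOut_process_covid_csv_data.2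
def Claim_exact_process_covid_csv_data : Prop := ∀ (covid_csv_data : List String), Dom_process_covid_csv_data covid_csv_data → Pre_process_covid_csv_data covid_csv_data → D_process_covid_csv_data covid_csv_data → process_covid_csv_data covid_csv_data ≠ process_covid_csv_data_alt covid_csv_data

-- ===== LEMMAS AND PROOFS =====

lemma pvGetCell (r : List String) (k : Nat) (hk : k < r.length) :
    PySem.List.pyGet? r (k : Int) = some (r.getD k "") := by
  rw [PySem.List.pyGet?_natCast, List.getElem?_eq_getElem hk, List.getD_eq_getElem r "" hk]

-- proof-side mirror of A's count machinery over the list of valid column-6 cells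
def pvCFold (cells : List String) (l7 : Option Int) (count : Int) : Option (Option Int) :=
  match cells with
  | [] => some l7
  | c :: rest =>
    if count ≤ 8 then
      if 1 < count then
        match PySem.Int.ofStr? c with
        | none => none
        | some x => pvCFold rest (some (pvOrAcc l7 x)) (count + 1)
      else pvCFold rest l7 (count + 1)
    else pvCFold rest l7 count

-- proof-side: A's accumulation over the already-parsed values
def pvQF (xs : List Int) (acc : Option Int) : Option Int :=
  match xs with
  | [] => acc
  | x :: rest => pvQF rest (some (pvOrAcc acc x))

lemma pvValidCells_of_len (rows : List (List String)) (h : ∀ r ∈ rows, 7 ≤ r.length) :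
    pvValidCells rows = some ((rows.map (fun r => r.getD 6 "")).filter
      (fun c => decide (c ≠ "None" ∧ PySem.Str.len (PySem.Str.replace c "\n" "") > 0))) := by
  induction rows with
  | nil => simp [pvValidCells]
  | cons r rest ih =>
    have h7 : 7 ≤ r.length := h r (by simp)
    have hrest := ih (fun r hr => h r (by simp [hr]))
    have h6 := pvGetCell r 6 (by omega)
    norm_num at h6
    rw [pvValidCells, h6]
    simp [hrest, List.filter_cons]
    split_ifs <;> simp

lemma pvCases_isSome (cells : List String)
    (h : ∀ c ∈ cells, (PySem.Int.ofStr? c).isSome) : ∃ xs, pvCases cells = some xs := by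
  induction cells with
  | nil => exact ⟨[], rfl⟩
  | cons c rest ih =>
    obtain ⟨x, hx⟩ := Option.isSome_iff_exists.mp (h c (by simp))
    obtain ⟨xs, hxs⟩ := ih (fun c hc => h c (by simp [hc]))
    exact ⟨x :: xs, by rw [pvCases, hx, hxs]⟩

lemma pvCases_parsed (cells : List String) : ∀ xs, pvCases cells = some xs →
    xs = cells.map (fun c => (PySem.Int.ofStr? c).getD 0) := by
  induction cells with
  | nil => intro xs hxs; simp [pvCases] at hxs; simp [hxs.symm]
  | cons c rest ih =>
    intro xs hxs
    rw [pvCases] at hxs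
    cases hx : PySem.Int.ofStr? c with
    | none => rw [hx] at hxs; cases hxs
    | some x =>
      rw [hx] at hxs
      cases hr : pvCases rest with
      | none => rw [hr] at hxs; cases hxs
      | some ys =>
        rw [hr] at hxs
        obtain rfl := Option.some.inj hxs
        simp [hx, ih ys hr]

lemma pvCFold_gt8 (cells : List String) (l7 : Option Int) (count : Int) (h : ¬ count ≤ 8) :
    pvCFold cells l7 count = some l7 := by
  induction cells with
  | nil => rfl
  | cons c rest ih => rw [pvCFold, if_neg h]; exact ih

lemma pvCFold_eq_qf (cells : List String) : ∀ (k : Nat) (l7 : Option Int) (xs : List Int), k ≤ 7 →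
    pvCases (cells.take k) = some xs →
    pvCFold cells l7 (9 - (k : Int)) = some (pvQF xs l7) := by
  induction cells with
  | nil =>
    intro k l7 xs _ hxs
    simp [pvCases] at hxs
    subst hxs
    simp [pvCFold, pvQF]
  | cons c rest ih =>
    intro k l7 xs hk hxs
    rcases Nat.eq_zero_or_pos k with hk0 | hkpos
    · subst hk0
      simp [pvCases] at hxs
      subst hxs
      rw [pvCFold, if_neg (by norm_num)]
      exact pvCFold_gt8 rest l7 9 (by norm_num)
    · rw [pvCFold, if_pos (by omega), if_pos (by omega)]
      obtain ⟨k', rfl⟩ : ∃ k', k = k' + 1 := ⟨k - 1, by omega⟩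
      rw [List.take_succ_cons, pvCases] at hxs
      cases hx : PySem.Int.ofStr? c with
      | none => rw [hx] at hxs; cases hxs
      | some x =>
        rw [hx] at hxs
        cases hr : pvCases (rest.take k') with
        | none => rw [hr] at hxs; cases hxs
        | some ys =>
          rw [hr] at hxs
          obtain rfl := Option.some.inj hxs
          have hcast : (9 : Int) - ((k' + 1 : Nat) : Int) + 1 = 9 - (k' : Int) := by push_cast; omega
          simp only [hcast]
          show pvCFold rest (some (pvOrAcc l7 x)) (9 - (k' : Int)) = _
          rw [ih k' (some (pvOrAcc l7 x)) ys (by omega) hr, pvQF]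

lemma pvCFold_one (cells : List String) (xs : List Int)
    (hxs : pvCases ((cells.take 8).drop 1) = some xs) :
    pvCFold cells none 1 = some (pvQF xs none) := by
  cases cells with
  | nil =>
    simp [pvCases] at hxs
    subst hxs
    simp [pvCFold, pvQF]
  | cons c rest =>
    rw [pvCFold, if_pos (by norm_num), if_neg (by norm_num)]
    rw [List.take_succ_cons, List.drop_one, List.tail_cons] at hxs
    have h := pvCFold_eq_qf rest 7 none xs (by omega) hxs
    norm_num at h
    rw [show (1:Int) + 1 = 2 by norm_num, h]

-- A's accumulator equals the running prefix sum minus the current reset base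
lemma pvQF_rb (xs : List Int) : ∀ (b br : Int),
    pvQF xs (some (b - br)) =
      some ((xs.foldl pvRBStep (b, br)).1 - (xs.foldl pvRBStep (b, br)).2) := by
  induction xs with
  | nil => intro b br; rfl
  | cons x rest ih =>
    intro b br
    have hacc : pvOrAcc (some (b - br)) x = (b + x) - (if b + x = br then b else br) := by
      simp only [pvOrAcc]
      split_ifs with h1 h2 h2 <;> omega
    rw [pvQF, hacc, List.foldl_cons]
    exact ih (b + x) (if b + x = br then b else br)

lemma pvRB_fst (xs : List Int) : ∀ (b br : Int), (xs.foldl pvRBStep (b, br)).1 = b + xs.sum := by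
  induction xs with
  | nil => intro b br; simp
  | cons x rest ih =>
    intro b br
    rw [List.foldl_cons, List.sum_cons]
    show (rest.foldl pvRBStep (b + x, _)).1 = _
    rw [ih]; ring

lemma pvQF_rb_none (xs : List Int) (h : xs ≠ []) :
    pvQF xs none = some (xs.sum - pvRB xs) := by
  cases xs with
  | nil => exact absurd rfl h
  | cons y rest =>
    have h1 : pvQF (y :: rest) none = pvQF rest (some y) := rfl
    have hstep : pvRBStep (0, 0) y = (y, 0) := by
      simp only [pvRBStep, zero_add]
      split_ifs with hz <;> simp [hz]
    have h2 := pvQF_rb rest y 0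
    rw [sub_zero] at h2
    rw [h1, h2, pvRB, List.foldl_cons, hstep, pvRB_fst]
    simp [List.sum_cons]

lemma pvFirstInt_some (k : Nat) (hk : k < 7) (rows : List (List String))
    (hlen : ∀ r ∈ rows, 7 ≤ r.length)
    (h : ∀ c ∈ ((rows.map (fun r => r.getD k "")).find?
      (fun c => decide (c ≠ "None" ∧ PySem.Str.len c > 0))), (PySem.Int.ofStr? c).isSome) :
    ∃ H, pvFirstInt (k : Int) rows = some H := by
  induction rows with
  | nil => exact ⟨none, rfl⟩
  | cons r rest ih =>
    have h7 : 7 ≤ r.length := hlen r (by simp)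
    have hg := pvGetCell r k (by omega)
    simp only [pvFirstInt, hg]
    by_cases hc : r.getD k "" ≠ "None" ∧ PySem.Str.len (r.getD k "") > 0
    · have hfind : ((r :: rest).map (fun r => r.getD k "")).find?
          (fun c => decide (c ≠ "None" ∧ PySem.Str.len c > 0)) = some (r.getD k "") := by
        simp only [List.map_cons]
        exact List.find?_cons_of_pos (by exact decide_eq_true hc)
      obtain ⟨x, hx⟩ := Option.isSome_iff_exists.mp (h _ (by rw [hfind]; exact rfl))
      rw [if_pos hc, hx]
      exact ⟨some x, rfl⟩
    · rw [if_neg hc]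
      refine ih (fun r hr => hlen r (by simp [hr])) ?_
      intro c hcmem
      refine h c ?_
      rw [List.map_cons, List.find?_cons_of_neg (p := fun c => decide (c ≠ "None" ∧ PySem.Str.len c > 0)) (fun hb => hc (of_decide_eq_true hb))]
      exact hcmem

lemma pvInRange (n : Nat) (k : Nat) (h : k < n) : PySem.Raise.InRange n (k : Int) := by
  simp [PySem.Raise.InRange]; omega

lemma pvLoopA_go (lines : List String) : ∀ (l7 h d : Option Int) (count : Int), 1 ≤ count →
    ∀ vs, pvValidCells (lines.map pvSplit) = some vs →
    ∀ L, pvCFold vs l7 count = some L →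
    ∀ H, (h = none → pvFirstInt 5 (lines.map pvSplit) = some H) →
    ∀ D, (d = none → pvFirstInt 4 (lines.map pvSplit) = some D) →
    ∃ c', pvLoopA lines (l7, h, d, count) =
      some (L, (if h = none then H else h), (if d = none then D else d), c') := by
  induction lines with
  | nil =>
    intro l7 h d count hcnt vs hvs L hL H hH D hD
    simp only [List.map_nil, pvValidCells] at hvs
    obtain rfl := Option.some.inj hvs
    simp only [pvCFold] at hL
    obtain rfl := Option.some.inj hL
    refine ⟨count, ?_⟩
    rw [pvLoopA]
    cases h with
    | some v => cases d with
      | some w => rfl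
      | none =>
        have hD' := hD rfl
        obtain rfl := Option.some.inj hD'; rfl
    | none =>
      have hH' := hH rfl
      obtain rfl := Option.some.inj hH'
      cases d with
      | some w => rfl
      | none =>
        have hD' := hD rfl
        obtain rfl := Option.some.inj hD'; rfl
  | cons line rest ih =>
    intro l7 h d count hcnt vs hvs L hL H hH D hD
    simp only [List.map_cons, pvValidCells] at hvs
    cases hc6 : PySem.List.pyGet? (pvSplit line) 6 with
    | none => rw [hc6] at hvs; dsimp only at hvs; cases hvs
    | some c6 =>
    rw [hc6] at hvs
    dsimp only at hvs
    have hlen7 : 7 ≤ (pvSplit line).length := by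
      by_contra hlt
      have hnone : PySem.List.pyGet? (pvSplit line) 6 = none := by
        rw [PySem.List.pyGet?_eq_none_iff]
        intro hir
        simp [PySem.Raise.InRange] at hir
        omega
      rw [hnone] at hc6; cases hc6
    cases h5g : PySem.List.pyGet? (pvSplit line) 5 with
    | none =>
      exfalso
      rw [PySem.List.pyGet?_eq_none_iff] at h5g
      exact h5g (by exact_mod_cast pvInRange _ 5 (by omega))
    | some d5v =>
    cases h4g : PySem.List.pyGet? (pvSplit line) 4 with
    | none =>
      exfalso
      rw [PySem.List.pyGet?_eq_none_iff] at h4g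
      exact h4g (by exact_mod_cast pvInRange _ 4 (by omega))
    | some d4v =>
    -- characterize the column-6 update
    have hstep6 : ∃ l7n cn vs', pvStep6 l7 count c6 = some (l7n, cn) ∧
        pvValidCells (rest.map pvSplit) = some vs' ∧ pvCFold vs' l7n cn = some L ∧ 1 ≤ cn := by
      by_cases h6 : c6 ≠ "None" ∧ PySem.Str.len (PySem.Str.replace c6 "\n" "") > 0
      · rw [if_pos h6] at hvs
        cases hvr : pvValidCells (rest.map pvSplit) with
        | none => rw [hvr] at hvs; cases hvs
        | some vs' =>
        rw [hvr] at hvs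
        obtain rfl := Option.some.inj hvs
        by_cases h8 : count ≤ 8
        · by_cases h1 : count > 1
          · rw [pvCFold, if_pos h8, if_pos h1] at hL
            cases hx : PySem.Int.ofStr? c6 with
            | none => rw [hx] at hL; cases hL
            | some x =>
              rw [hx] at hL
              exact ⟨some (pvOrAcc l7 x), count + 1, vs',
                by rw [pvStep6, if_pos ⟨h6.1, h6.2, h8⟩, if_pos h1, hx], rfl, hL, by omega⟩
          · rw [pvCFold, if_pos h8, if_neg h1] at hL
            exact ⟨l7, count + 1, vs',
              by rw [pvStep6, if_pos ⟨h6.1, h6.2, h8⟩, if_neg h1], rfl, hL, by omega⟩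
        · rw [pvCFold, if_neg h8] at hL
          exact ⟨l7, count, vs',
            by rw [pvStep6, if_neg (fun hcon => h8 hcon.2.2)], rfl, hL, hcnt⟩
      · rw [if_neg h6] at hvs
        exact ⟨l7, count, vs,
          by rw [pvStep6, if_neg (fun hcon => h6 ⟨hcon.1, hcon.2.1⟩)], hvs, hL, hcnt⟩
    obtain ⟨l7n, cn, vs', hp6, hvs', hL', hcn⟩ := hstep6
    -- characterize the hospital-cases statement
    have hstep5 : ∃ hn, pvStep5 h d5v = some hn ∧
        (hn = none → pvFirstInt 5 (rest.map pvSplit) = some H) ∧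
        (if hn = none then H else hn) = (if h = none then H else h) := by
      cases h with
      | some v =>
        refine ⟨some v, ?_, ?_, ?_⟩
        · rw [pvStep5, if_neg (fun hcon => by simp at hcon)]
        · intro hcon; cases hcon
        · rfl
      | none =>
        have hH' := hH rfl
        simp only [List.map_cons, pvFirstInt, h5g] at hH'
        by_cases h5c : d5v ≠ "None" ∧ PySem.Str.len d5v > 0
        · rw [if_pos h5c] at hH'
          cases hx : PySem.Int.ofStr? d5v with
          | none => rw [hx] at hH'; cases hH'
          | some x =>
            rw [hx] at hH'
            obtain rfl := Option.some.inj hH'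
            refine ⟨some x, ?_, ?_, ?_⟩
            · rw [pvStep5, if_pos ⟨h5c.1, rfl, h5c.2⟩, hx]
            · intro hcon; cases hcon
            · simp
        · rw [if_neg h5c] at hH'
          refine ⟨none, ?_, fun _ => hH', rfl⟩
          rw [pvStep5, if_neg (fun hcon => h5c ⟨hcon.1, hcon.2.2⟩)]
    obtain ⟨hn, hp5, hHn, hHeq⟩ := hstep5
    -- characterize the total-deaths statement
    have hstep4 : ∃ dn, pvStep5 d d4v = some dn ∧
        (dn = none → pvFirstInt 4 (rest.map pvSplit) = some D) ∧
        (if dn = none then D else dn) = (if d = none then D else d) := by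
      cases d with
      | some v =>
        refine ⟨some v, ?_, ?_, ?_⟩
        · rw [pvStep5, if_neg (fun hcon => by simp at hcon)]
        · intro hcon; cases hcon
        · rfl
      | none =>
        have hD' := hD rfl
        simp only [List.map_cons, pvFirstInt, h4g] at hD'
        by_cases h4c : d4v ≠ "None" ∧ PySem.Str.len d4v > 0
        · rw [if_pos h4c] at hD'
          cases hx : PySem.Int.ofStr? d4v with
          | none => rw [hx] at hD'; cases hD'
          | some x =>
            rw [hx] at hD'
            obtain rfl := Option.some.inj hD'
            refine ⟨some x, ?_, ?_, ?_⟩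
            · rw [pvStep5, if_pos ⟨h4c.1, rfl, h4c.2⟩, hx]
            · intro hcon; cases hcon
            · simp
        · rw [if_neg h4c] at hD'
          refine ⟨none, ?_, fun _ => hD', rfl⟩
          rw [pvStep5, if_neg (fun hcon => h4c ⟨hcon.1, hcon.2.2⟩)]
    obtain ⟨dn, hp4, hDn, hDeq⟩ := hstep4
    obtain ⟨c', hrec⟩ := ih l7n hn dn cn hcn vs' hvs' L hL' H hHn D hDn
    refine ⟨c', ?_⟩
    rw [pvLoopA]
    have hstep : pvStepA (l7, h, d, count) line = some (l7n, hn, dn, cn) := by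
      simp only [pvStepA]
      rw [if_pos (by omega : count > 0), hc6, h5g, h4g]
      dsimp only
      rw [hp6]
      dsimp only
      rw [hp5]
      dsimp only
      rw [hp4]
    rw [hstep]
    simp only [hrec, hHeq, hDeq]

-- under Pre_, both programs are the same pair of scans plus their respective 7-day totals
lemma pvChar (l : List String) (hpre : Pre_process_covid_csv_data l) :
    ∃ hosp deaths,
      process_covid_csv_data l = (pvQF (pvD6cells l) none, hosp, deaths) ∧
      process_covid_csv_data_alt l =
        ((if pvD6cells l ≠ [] then some (pvD6cells l).sum else none), hosp, deaths) := by
  cases l with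
  | nil => exact ⟨none, none, rfl, rfl⟩
  | cons hd tl =>
    simp only [Pre_process_covid_csv_data, List.drop_succ_cons, List.drop_zero] at hpre
    obtain ⟨hlen, hparse, h5p, h4p⟩ := hpre
    have hvs := pvValidCells_of_len (tl.map pvSplit) hlen
    obtain ⟨xs, hxs⟩ := pvCases_isSome _ hparse
    have hxseq := pvCases_parsed _ xs hxs
    have hd6 : pvD6cells (hd :: tl) = xs := by
      rw [pvD6cells, List.drop_succ_cons, List.drop_zero, hxseq]
    have hcf := pvCFold_one _ xs hxs
    obtain ⟨H, hHs⟩ := pvFirstInt_some 5 (by norm_num) (tl.map pvSplit) hlen h5p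
    obtain ⟨D, hDs⟩ := pvFirstInt_some 4 (by norm_num) (tl.map pvSplit) hlen h4p
    norm_num at hHs hDs
    obtain ⟨c', hloop⟩ := pvLoopA_go tl none none none 1 (by norm_num) _ hvs _ hcf
      H (fun _ => hHs) D (fun _ => hDs)
    have hstep0 : pvStepA (none, none, none, 0) hd = some (none, none, none, 1) := by
      simp [pvStepA]
    have hslice : (PySem.List.slice (hd :: tl) (some 1) none).map pvSplit = tl.map pvSplit := by
      rw [PySem.List.slice_from_one, List.tail_cons]
    have hsl8 : ∀ (vsl : List String),
        PySem.List.slice vsl (some 1) (some 8) = (vsl.take 8).drop 1 := by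
      intro vsl
      have hsl := PySem.List.slice_toNat (xs := vsl) (a := 1) (b := 8) (by norm_num) (by norm_num)
      norm_num at hsl
      rw [hsl, List.drop_take]
      norm_num [List.drop_one, show Int.toNat 8 = 8 from rfl]
    refine ⟨H, D, ?_, ?_⟩
    · rw [process_covid_csv_data, pvLoopA, hstep0]
      dsimp only
      rw [hloop, hd6]
      simp
    · rw [process_covid_csv_data_alt, hslice, hvs]
      dsimp only
      rw [hsl8, hxs]
      dsimp only
      rw [hHs, hDs, hd6]

-- ===== VERDICT (by name: the statements are the Claim_ definitions above) =====
theorem process_covid_csv_data_spec : Claim_unchanged_process_covid_csv_data := by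
  intro l _hdom hpre
  unfold Spec_process_covid_csv_data
  intro hnd
  obtain ⟨hosp, deaths, hA, hB⟩ := pvChar l hpre
  have hrb : pvRB (pvD6cells l) = 0 := by
    by_contra hne
    exact hnd hne
  rw [hA, hB]
  cases hxs : pvD6cells l with
  | nil => simp [pvQF]
  | cons y rest =>
    rw [hxs] at hrb
    rw [pvQF_rb_none (y :: rest) (by simp), hrb]
    simp

theorem process_covid_csv_data_changed : Claim_changed_process_covid_csv_data := by
  unfold Claim_changed_process_covid_csv_data; decide

theorem process_covid_csv_data_tight : Claim_exact_process_covid_csv_data := by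
  intro l _hdom hpre hd heq
  obtain ⟨hosp, deaths, hA, hB⟩ := pvChar l hpre
  rw [hA, hB] at heq
  have hrb : pvRB (pvD6cells l) ≠ 0 := hd
  cases hxs : pvD6cells l with
  | nil => rw [hxs] at hrb; exact hrb rfl
  | cons y rest =>
    rw [hxs] at hrb heq
    rw [pvQF_rb_none (y :: rest) (by simp)] at heq
    simp only [ne_eq, reduceCtorEq, not_false_eq_true, if_true] at heq
    have h1 : some ((y :: rest).sum - pvRB (y :: rest)) = some ((y :: rest).sum) := congrArg Prod.fst heq
    have h2 : (y :: rest).sum - pvRB (y :: rest) = (y :: rest).sum := Option.some.inj h1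
    omega
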